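-- pv_equiv track=rewrite | github.com/AlifSrSE/ProblemSolves | 43B-letter.py | can_compose
-- ===== SOURCE A (Python) =====
-- from collections import defaultdict
--
-- def can_compose(s1, s2):
--     s2_counts = defaultdict(int)
--     for char in s2:
--         if char != ' ':
--             s2_counts[char] += 1
--
--     s1_counts = defaultdict(int)
--     for char in s1:
--         if char != ' ':
--             s1_counts[char] += 1
--
--     for char, count in s2_counts.items():
--         if s1_counts[char] < count:
--             return False
--     return True
-- ===== SOURCE B (Python) =====
-- def can_compose(s1, s2):
--     # Sort the space-stripped characters of both strings and check multiset
--     # containment by a single two-pointer merge over the two sorted lists.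
--     a = sorted(ch for ch in s1 if ch != ' ')
--     b = sorted(ch for ch in s2 if ch != ' ')
--     i = 0
--     for ch in b:
--         while i < len(a) and a[i] < ch:
--             i += 1
--         if i == len(a) or a[i] != ch:
--             return False
--         i += 1
--     return True
-- ===== Notes on version B (the rewrite author's own statement) =====
-- stated objective: alternative
-- what changed: B sorts the space-stripped characters of both strings and decides multiset containment with a two-pointer merge over the two sorted sequences, instead of A's two frequency maps plus a pass over s2's distinct characters.
import Mathlib
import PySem

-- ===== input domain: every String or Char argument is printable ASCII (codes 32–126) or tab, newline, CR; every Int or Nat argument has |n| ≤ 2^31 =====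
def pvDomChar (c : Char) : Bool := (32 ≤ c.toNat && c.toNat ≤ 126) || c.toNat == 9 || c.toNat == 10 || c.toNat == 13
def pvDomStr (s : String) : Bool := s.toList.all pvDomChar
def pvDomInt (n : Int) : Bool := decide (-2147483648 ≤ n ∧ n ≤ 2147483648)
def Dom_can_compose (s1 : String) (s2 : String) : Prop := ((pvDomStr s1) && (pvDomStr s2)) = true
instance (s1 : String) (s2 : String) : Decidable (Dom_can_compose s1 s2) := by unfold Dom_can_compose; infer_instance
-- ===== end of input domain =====

-- B replaces A's frequency-count comparison by sort-then-two-pointer-merge multiset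
-- containment on the space-stripped strings (objective: alternative).

-- ===== PORT A =====
def can_compose (s1 : String) (s2 : String) : Bool :=
  let s2_counts : PySem.Dict Char Int :=
    s2.toList.foldl (fun d c => if c ≠ ' ' then d.modify c 0 (· + 1) else d) PySem.Dict.empty
  let s1_counts : PySem.Dict Char Int :=
    s1.toList.foldl (fun d c => if c ≠ ' ' then d.modify c 0 (· + 1) else d) PySem.Dict.empty
  s2_counts.items.all (fun p => !(s1_counts.getD p.1 0 < p.2))

-- ===== PORT B =====
-- the two-pointer merge of Source B: for each ch of b, advance in a past smaller
-- characters, then demand a match and consume it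
def mergeSub : List Char → List Char → Bool
  | [], _ => true
  | _ :: _, [] => false
  | c :: bs, x :: as =>
    if x < c then mergeSub (c :: bs) as
    else if x = c then mergeSub bs as
    else false
termination_by b a => (b.length, a.length)

def can_compose_alt (s1 : String) (s2 : String) : Bool :=
  let a := PySem.List.sorted (s1.toList.filter (· ≠ ' ')) (fun x => x) false
  let b := PySem.List.sorted (s2.toList.filter (· ≠ ' ')) (fun x => x) false
  mergeSub b a

-- ===== PRECONDITION & SPEC =====
def Spec_can_compose (s1 : String) (s2 : String) (out : Bool) : Prop := out = can_compose_alt s1 s2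
instance (s1 : String) (s2 : String) (out : Bool) : Decidable (Spec_can_compose s1 s2 out) := by unfold Spec_can_compose; infer_instance

-- ===== CLAIM =====
def Claim_equal_can_compose : Prop := ∀ (s1 : String) (s2 : String), Dom_can_compose s1 s2 → Spec_can_compose s1 s2 (can_compose s1 s2)

-- ===== LEMMAS AND PROOFS =====

-- fold with an `if` guard = fold over the filtered list
theorem pv_foldl_guard {α : Type} (f : PySem.Dict Char α → Char → PySem.Dict Char α)
    (l : List Char) (d : PySem.Dict Char α) :
    l.foldl (fun d c => if c ≠ ' ' then f d c else d) d = (l.filter (· ≠ ' ')).foldl f d := by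
  induction l generalizing d with
  | nil => rfl
  | cons c rest ih =>
    rw [List.foldl_cons, List.filter_cons]
    by_cases h : c = ' '
    · rw [if_neg (by simp [h]), if_neg (by simp [h]), ih]
    · rw [if_pos (by simp [h]), if_pos (by simp [h]), List.foldl_cons, ih]

theorem pv_count_cons_ne (x d : Char) (l : List Char) (h : d ≠ x) :
    (x :: l).count d = l.count d := by
  simp [Ne.symm h]

theorem pv_count_filter (c : Char) (h : c ≠ ' ') (l : List Char) :
    (l.filter (· ≠ ' ')).count c = l.count c := by
  induction l with
  | nil => rfl
  | cons x rest ih =>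
    rw [List.filter_cons]
    by_cases hx : x = ' '
    · subst hx
      rw [if_neg (by simp), ih, pv_count_cons_ne ' ' c rest h]
    · rw [if_pos (by simp [hx])]
      by_cases hcx : c = x
      · rw [hcx] at ih ⊢
        rw [List.count_cons_self, List.count_cons_self, ih]
      · rw [pv_count_cons_ne x c _ hcx, pv_count_cons_ne x c _ hcx, ih]

-- count of a character strictly below every element is 0
theorem pv_count_zero_of_lt (c : Char) (l : List Char) (h : ∀ e ∈ l, c < e) :
    l.count c = 0 := by
  rw [List.count_eq_zero]
  intro hm
  exact absurd (h c hm) (lt_irrefl c)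

-- the merge succeeds on sorted lists iff b is a sub-multiset of a
theorem pv_mergeSub_iff (a b : List Char)
    (ha : a.Pairwise (· ≤ ·)) (hb : b.Pairwise (· ≤ ·)) :
    mergeSub b a = true ↔ ∀ c, b.count c ≤ a.count c := by
  induction a generalizing b with
  | nil =>
    cases b with
    | nil => simp [mergeSub]
    | cons c bs =>
      simp only [mergeSub, Bool.false_eq_true, false_iff, not_forall]
      refine ⟨c, ?_⟩
      rw [List.count_cons_self, List.count_nil]
      omega
  | cons x as ih =>
    rcases List.pairwise_cons.mp ha with ⟨hxa, has⟩
    cases b with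
    | nil => simp [mergeSub]
    | cons c bs =>
      rcases List.pairwise_cons.mp hb with ⟨hcb, hbs⟩
      by_cases hlt : x < c
      · rw [show mergeSub (c :: bs) (x :: as) = mergeSub (c :: bs) as from by
          simp [mergeSub, hlt]]
        rw [ih (c :: bs) has hb]
        constructor
        · intro h d
          have h1 := h d
          by_cases hdx : d = x
          · rw [hdx, List.count_cons_self]
            rw [hdx] at h1; omega
          · rw [pv_count_cons_ne x d as hdx]; exact h1
        · intro h d
          by_cases hdx : d = x
          · rw [hdx]
            have h0 : (c :: bs).count x = 0 := by
              apply pv_count_zero_of_lt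
              intro e he
              rcases List.mem_cons.mp he with rfl | he'
              · exact hlt
              · exact lt_of_lt_of_le hlt (hcb e he')
            rw [h0]; omega
          · have h2 := h d
            rw [pv_count_cons_ne x d as hdx] at h2
            exact h2
      · by_cases heq : x = c
        · rw [show mergeSub (c :: bs) (x :: as) = mergeSub bs as from by
            simp [mergeSub, heq]]
          rw [ih bs has hbs, heq]
          constructor
          · intro h d
            by_cases hdc : d = c
            · rw [hdc, List.count_cons_self, List.count_cons_self]
              have := h c; omega
            · rw [pv_count_cons_ne c d bs hdc, pv_count_cons_ne c d as hdc]
              exact h d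
          · intro h d
            have h2 := h d
            by_cases hdc : d = c
            · rw [hdc] at h2 ⊢
              rw [List.count_cons_self, List.count_cons_self] at h2
              omega
            · rw [pv_count_cons_ne c d bs hdc, pv_count_cons_ne c d as hdc] at h2
              exact h2
        · have hgt : c < x := lt_of_le_of_ne (not_lt.mp hlt) (Ne.symm heq)
          rw [show mergeSub (c :: bs) (x :: as) = false from by
            simp [mergeSub, hlt, heq]]
          simp only [Bool.false_eq_true, false_iff, not_forall]
          refine ⟨c, ?_⟩
          have h0 : (x :: as).count c = 0 := by
            apply pv_count_zero_of_lt
            intro e he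
            rcases List.mem_cons.mp he with rfl | he'
            · exact hgt
            · exact lt_of_lt_of_le hgt (hxa e he')
          rw [h0, List.count_cons_self]
          omega

-- A's final loop succeeds iff every non-space char of s2 fits in s1's counts
theorem pv_A_iff (s1 s2 : List Char) :
    ((PySem.Dict.counter (s2.filter (· ≠ ' '))).items.all
      (fun p => !((PySem.Dict.counter (s1.filter (· ≠ ' '))).getD p.1 0 < p.2)) = true) ↔
    ∀ c, c ≠ ' ' → (s2.count c : Int) ≤ (PySem.Dict.counter (s1.filter (· ≠ ' '))).getD c 0 := by
  rw [PySem.Dict.items_counter]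
  simp only [List.all_eq_true, List.mem_map, Bool.not_eq_eq_eq_not, Bool.not_true,
    decide_eq_false_iff_not, not_lt, forall_exists_index, and_imp]
  constructor
  · intro h c hc
    by_cases hm : c ∈ (s2.filter (· ≠ ' '))
    · have hmem : c ∈ PySem.Set.ofList (s2.filter (· ≠ ' ')) := by
        rw [PySem.Set.mem_ofList]; exact hm
      have := h (c, ((s2.filter (· ≠ ' ')).count c : Int)) c hmem rfl
      simp only at this
      rw [← pv_count_filter c hc s2]
      exact this
    · have h0 : (s2.filter (· ≠ ' ')).count c = 0 := List.count_eq_zero.mpr hm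
      rw [← pv_count_filter c hc s2, h0]
      push_cast
      rw [PySem.Dict.getD_counter]
      exact Int.natCast_nonneg _
  · intro h p c hmem hp
    subst hp
    rw [PySem.Set.mem_ofList] at hmem
    have hc : c ≠ ' ' := of_decide_eq_true (List.mem_filter.mp hmem).2
    have := h c hc
    simp only
    rw [← pv_count_filter c hc s2] at this
    exact this

-- B succeeds iff the same count condition holds
theorem pv_B_iff (s1 s2 : String) :
    can_compose_alt s1 s2 = true ↔
    ∀ c, c ≠ ' ' → s2.toList.count c ≤ (s1.toList.filter (· ≠ ' ')).count c := by
  unfold can_compose_alt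
  rw [pv_mergeSub_iff _ _ (PySem.List.sorted_pairwise _ _) (PySem.List.sorted_pairwise _ _)]
  have hca : ∀ c, (PySem.List.sorted (s1.toList.filter (· ≠ ' ')) (fun x => x) false).count c
      = (s1.toList.filter (· ≠ ' ')).count c :=
    fun c => (PySem.List.sorted_perm _ _ _).count_eq c
  have hcb : ∀ c, (PySem.List.sorted (s2.toList.filter (· ≠ ' ')) (fun x => x) false).count c
      = (s2.toList.filter (· ≠ ' ')).count c :=
    fun c => (PySem.List.sorted_perm _ _ _).count_eq c
  constructor
  · intro h c hc
    have := h c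
    rw [hca, hcb, pv_count_filter c hc s2.toList] at this
    exact this
  · intro h c
    rw [hca, hcb]
    by_cases hc : c = ' '
    · subst hc
      have h0 : (s2.toList.filter (· ≠ ' ')).count ' ' = 0 := by
        rw [List.count_eq_zero]
        intro hm
        exact absurd rfl (of_decide_eq_true (List.mem_filter.mp hm).2)
      rw [h0]
      omega
    · rw [pv_count_filter c hc s2.toList]
      exact h c hc

-- ===== VERDICT =====
theorem can_compose_spec : Claim_equal_can_compose := by
  intro s1 s2 _
  unfold Spec_can_compose
  rw [eq_comm, Bool.eq_iff_iff, pv_B_iff]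
  unfold can_compose
  rw [pv_foldl_guard, pv_foldl_guard, ← PySem.Dict.counter_eq_foldl, ← PySem.Dict.counter_eq_foldl,
      pv_A_iff s1.toList s2.toList]
  constructor
  · intro h c hc
    rw [PySem.Dict.getD_counter]
    exact_mod_cast h c hc
  · intro h c hc
    have h2 := h c hc
    rw [PySem.Dict.getD_counter] at h2
    exact_mod_cast h2
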